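-- pv_equiv track=rewrite | github.com/bunshue/vcs | _4.python/ml/ml01/big_data_gold01.py | create_collection_1
-- ===== SOURCE A (Python) =====
-- def create_collection_1(data):
--     c = []
--     for item in data:
--         for g in item:
--             if not [g] in c:
--                 c.append([g])
--     c.sort()
--     return list(map(frozenset, c))
-- ===== SOURCE B (Python) =====
-- def create_collection_1(data):
--     flat = [g for item in data for g in item]
--     flat.sort()
--     uniques = []
--     for g in flat:
--         if not uniques or uniques[-1] != g:
--             uniques.append(g)
--     return [frozenset([g]) for g in uniques]
-- ===== Notes on version B (the rewrite author's own statement) =====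
-- stated objective: faster
-- what changed: Replaces A's per-element linear membership scan over the growing collection (then a sort of singleton lists) by flatten, sort the ints once, and a single adjacent-duplicate-removal pass, wrapping frozensets only at the end.
import Mathlib
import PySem

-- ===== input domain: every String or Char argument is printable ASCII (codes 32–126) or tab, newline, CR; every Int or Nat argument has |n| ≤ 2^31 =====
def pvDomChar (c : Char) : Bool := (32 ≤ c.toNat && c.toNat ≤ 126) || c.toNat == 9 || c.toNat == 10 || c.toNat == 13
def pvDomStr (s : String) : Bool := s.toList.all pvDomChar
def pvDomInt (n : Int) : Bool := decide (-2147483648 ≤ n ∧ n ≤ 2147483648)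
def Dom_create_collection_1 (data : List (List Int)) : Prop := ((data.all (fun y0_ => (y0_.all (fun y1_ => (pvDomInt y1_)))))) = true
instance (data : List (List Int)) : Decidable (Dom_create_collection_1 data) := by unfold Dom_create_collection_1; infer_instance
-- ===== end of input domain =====

-- B replaces A's per-element membership scan over the growing collection by
-- flatten + one sort + one adjacent-duplicate-removal pass (frozenset wrapping last).

-- ===== PORT A =====
def create_collection_1 (data : List (List Int)) : List (List Int) :=
  let c := data.foldl (fun c item =>
    item.foldl (fun c g => if [g] ∈ c then c else c ++ [[g]]) c) []
  (PySem.List.sorted c (fun x => x)).map (fun x => PySem.Set.ofList x)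

-- ===== PORT B =====
def create_collection_1_alt (data : List (List Int)) : List (List Int) :=
  let flat := data.flatMap (fun item => item)
  let sortedFlat := PySem.List.sorted flat (fun x => x)
  let uniques := sortedFlat.foldl
    (fun u g => if u.getLast? = some g then u else u ++ [g]) []
  uniques.map (fun g => PySem.Set.ofList [g])

-- ===== PRECONDITION & SPEC =====
def Spec_create_collection_1 (data : List (List Int)) (out : List (List Int)) : Prop := out = create_collection_1_alt data
instance (data : List (List Int)) (out : List (List Int)) : Decidable (Spec_create_collection_1 data out) := by unfold Spec_create_collection_1; infer_instance

-- ===== CLAIM (what is proved, stated in full; the proofs are below) =====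
def Claim_equal_create_collection_1 : Prop := ∀ (data : List (List Int)), Dom_create_collection_1 data → Spec_create_collection_1 data (create_collection_1 data)

-- ===== LEMMAS AND PROOFS =====

theorem pv_mem_map_single {g : Int} {M : List Int} :
    ([g] ∈ M.map (fun x => [x])) ↔ g ∈ M := by
  simp

-- A's accumulation over a flat list builds the ordered dedup, as singletons.
theorem pv_fold_dedup (l : List Int) (M : List Int) :
    l.foldl (fun c g => if [g] ∈ c then c else c ++ [[g]]) (M.map (fun x => [x]))
      = (l.foldl PySem.Set.add M).map (fun x => [x]) := by
  induction l generalizing M with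
  | nil => rfl
  | cons g t ih =>
    simp only [List.foldl_cons]
    by_cases h : g ∈ M
    · rw [if_pos (pv_mem_map_single.mpr h)]
      rw [show PySem.Set.add M g = M by simp [PySem.Set.add, h]]
      exact ih M
    · rw [if_neg (fun hc => h (pv_mem_map_single.mp hc))]
      rw [show PySem.Set.add M g = M ++ [g] by simp [PySem.Set.add, h]]
      rw [show (M.map fun x => [x]) ++ [[g]] = ((M ++ [g]).map fun x => [x]) by simp]
      exact ih (M ++ [g])

theorem pv_lex_single (a b : Int) : ([a] < [b]) ↔ (a < b) := by
  constructor
  · intro h; cases h <;> simp_all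
  · intro h; exact List.Lex.rel h

theorem pv_insertBy_map (g : Int) (N : List Int) :
    PySem.List.insertBy (fun a b : List Int => decide (a < b)) [g] (N.map (fun x => [x]))
      = (PySem.List.insertBy (fun a b : Int => decide (a < b)) g N).map (fun x => [x]) := by
  induction N with
  | nil => rfl
  | cons y t ih =>
    simp only [List.map_cons, PySem.List.insertBy]
    rw [show (decide (([g] : List Int) < [y])) = decide (g < y) by
      simp [pv_lex_single]]
    by_cases h : g < y
    · simp [h]
    · simp only [decide_eq_true_eq, h, if_false]
      simp [ih]

-- sorting a list of singletons is mapping singleton over the sorted elements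
theorem pv_sorted_map (M : List Int) :
    PySem.List.sorted (M.map (fun x => [x])) (fun x => x)
      = (PySem.List.sorted M (fun x => x)).map (fun x => [x]) := by
  rw [PySem.List.sorted_eq_foldl_insertBy, PySem.List.sorted_eq_foldl_insertBy,
      List.foldl_map]
  have key : ∀ (M N : List Int),
      M.foldl (fun acc g => PySem.List.insertBy (fun a b : List Int => decide (a < b)) [g] acc)
        (N.map (fun x => [x]))
        = (M.foldl (fun acc g => PySem.List.insertBy (fun a b : Int => decide (a < b)) g acc) N).map
            (fun x => [x]) := by
    intro M
    induction M with
    | nil => intro N; rfl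
    | cons g t ih =>
      intro N
      simp only [List.foldl_cons, pv_insertBy_map]
      exact ih _
  exact key M []

theorem pv_le_getLast {acc : List Int} {m : Int}
    (hp : acc.Pairwise (· < ·)) (hm : acc.getLast? = some m) :
    ∀ a ∈ acc, a ≤ m := by
  induction acc with
  | nil => simp at hm
  | cons b t ih =>
    intro a ha
    cases t with
    | nil =>
      simp at hm ha; omega
    | cons c s =>
      rw [List.getLast?_cons_cons] at hm
      rcases List.mem_cons.mp ha with rfl | ha'
      · have hmmem : m ∈ c :: s := List.mem_of_getLast? hm
        have := (List.pairwise_cons.mp hp).1 m hmmem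
        omega
      · exact ih (List.pairwise_cons.mp hp).2 hm a ha'

-- the adjacent-dedup fold: strictly sorted output with the same members
theorem pv_adj (l : List Int) (acc : List Int)
    (hacc : acc.Pairwise (· < ·))
    (hl : l.Pairwise (· ≤ ·))
    (hb : ∀ m, acc.getLast? = some m → ∀ x ∈ l, m ≤ x) :
    (l.foldl (fun u g => if u.getLast? = some g then u else u ++ [g]) acc).Pairwise (· < ·)
      ∧ ∀ x, x ∈ l.foldl (fun u g => if u.getLast? = some g then u else u ++ [g]) acc
          ↔ x ∈ acc ∨ x ∈ l := by
  induction l generalizing acc with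
  | nil => exact ⟨hacc, by simp⟩
  | cons g t ih =>
    simp only [List.foldl_cons]
    by_cases h : acc.getLast? = some g
    · rw [if_pos h]
      have hgmem : g ∈ acc := List.mem_of_getLast? h
      have hb' : ∀ m, acc.getLast? = some m → ∀ x ∈ t, m ≤ x := by
        intro m hm x hx
        exact hb m hm x (List.mem_cons_of_mem _ hx)
      obtain ⟨h1, h2⟩ := ih acc hacc (List.pairwise_cons.mp hl).2 hb'
      refine ⟨h1, fun x => ?_⟩
      rw [h2 x]
      constructor
      · rintro (hx | hx)
        · exact Or.inl hx
        · exact Or.inr (List.mem_cons_of_mem _ hx)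
      · rintro (hx | hx)
        · exact Or.inl hx
        · rcases List.mem_cons.mp hx with rfl | hx'
          · exact Or.inl hgmem
          · exact Or.inr hx'
    · rw [if_neg h]
      have hacc' : (acc ++ [g]).Pairwise (· < ·) := by
        rw [List.pairwise_append]
        refine ⟨hacc, List.pairwise_singleton _ _, ?_⟩
        intro a ha b hbm
        rcases List.mem_singleton.mp hbm with rfl
        cases hlast : acc.getLast? with
        | none => simp [List.getLast?_eq_none_iff] at hlast; subst hlast; simp at ha
        | some m =>
          have h1 : a ≤ m := pv_le_getLast hacc hlast a ha
          have h2 : m ≤ b := hb m hlast b (List.mem_cons_self ..)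
          have h3 : m ≠ b := fun he => h (he ▸ hlast)
          omega
      have hb' : ∀ m, (acc ++ [g]).getLast? = some m → ∀ x ∈ t, m ≤ x := by
        intro m hm x hx
        rw [List.getLast?_append] at hm
        simp at hm
        subst hm
        exact (List.pairwise_cons.mp hl).1 x hx
      obtain ⟨h1, h2⟩ := ih (acc ++ [g]) hacc' (List.pairwise_cons.mp hl).2 hb'
      refine ⟨h1, fun x => ?_⟩
      rw [h2 x]
      simp only [List.mem_append, List.mem_cons]
      tauto

theorem pv_set_single (g : Int) : PySem.Set.ofList [g] = [g] := by
  simp [PySem.Set.ofList, PySem.Set.add]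

theorem create_collection_1_spec : Claim_equal_create_collection_1 := by
  intro data _
  unfold Spec_create_collection_1 create_collection_1 create_collection_1_alt
  simp only []
  set flat := data.flatMap (fun item => item) with hflat
  -- A's collection is the singleton-mapped ordered dedup of flat
  have hc : data.foldl (fun c item =>
        item.foldl (fun c g => if [g] ∈ c then c else c ++ [[g]]) c) []
      = (flat.foldl PySem.Set.add []).map (fun x => [x]) := by
    have h1 := pv_fold_dedup flat ([] : List Int)
    simp only [List.map_nil] at h1
    rw [hflat, List.foldl_flatMap] at h1
    exact h1
  rw [hc]
  rw [show flat.foldl PySem.Set.add [] = PySem.Set.ofList flat from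
    (PySem.Set.ofList_eq_foldl flat).symm]
  rw [pv_sorted_map]
  -- B's uniques equal sorted(set(flat))
  have huniq : (PySem.List.sorted flat (fun x => x)).foldl
        (fun u g => if u.getLast? = some g then u else u ++ [g]) []
      = PySem.List.sorted (PySem.Set.ofList flat) (fun x => x) := by
    obtain ⟨hp, hm⟩ := pv_adj (PySem.List.sorted flat (fun x => x)) []
      (List.Pairwise.nil)
      (PySem.List.sorted_pairwise flat (fun x => x))
      (by simp)
    have hp' : (PySem.List.sorted (PySem.Set.ofList flat) (fun x => x)).Pairwise (· < ·) :=
      PySem.List.sorted_ofList_pairwise_lt flat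
    have hnd1 : ((PySem.List.sorted flat (fun x => x)).foldl
        (fun u g => if u.getLast? = some g then u else u ++ [g]) []).Nodup :=
      hp.imp (fun h => ne_of_lt h)
    have hnd2 : (PySem.List.sorted (PySem.Set.ofList flat) (fun x => x)).Nodup :=
      hp'.imp (fun h => ne_of_lt h)
    have hperm : ((PySem.List.sorted flat (fun x => x)).foldl
        (fun u g => if u.getLast? = some g then u else u ++ [g]) []).Perm
        (PySem.List.sorted (PySem.Set.ofList flat) (fun x => x)) := by
      rw [List.perm_ext_iff_of_nodup hnd1 hnd2]
      intro a
      rw [hm a, PySem.List.mem_sorted, PySem.List.mem_sorted, PySem.Set.mem_ofList]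
      simp
    exact PySem.List.eq_of_perm_of_pairwise_le_of_injective (fun x => x)
      (fun _ _ h => h) hperm
      (hp.imp (fun h => le_of_lt h))
      (hp'.imp (fun h => le_of_lt h))
  rw [huniq]
  simp [pv_set_single]
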